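-- pv_equiv track=rewrite | github.com/AdamZhouSE/pythonHomework | Code/CodeRecords/2716/60628/255920.py | regionNum
-- ===== SOURCE A (Python) =====
-- def regionNum(grid):
--     n_len = len(grid) * 3
--     n_grid = [[0] * n_len for i in range(n_len)]
--     for i in range(len(grid)):
--         for j in range(len(grid)):
--             if grid[i][j] == '/':
--                 n_grid[i * 3 + 2][j * 3], n_grid[i * 3 + 1][j * 3 + 1], n_grid[i * 3][j * 3 + 2] = 1, 1, 1
--             if grid[i][j] == '\\':
--                 n_grid[i * 3][j * 3], n_grid[i * 3 + 1][j * 3 + 1], n_grid[i * 3 + 2][j * 3 + 2] = 1, 1, 1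
--
--     count = 0
--     for i in range(n_len):
--         for j in range(n_len):
--             if n_grid[i][j] == 0:
--                 count += 1
--                 dfs(n_grid, i, j)
--     return count
--
-- def dfs(n_grid, i, j):
--     if i >= 0 and j >= 0 and i < len(n_grid) and j < len(n_grid) and n_grid[i][j] == 0:
--         n_grid[i][j] = 1
--         dfs(n_grid, i - 1, j)
--         dfs(n_grid, i + 1, j)
--         dfs(n_grid, i, j - 1)
--         dfs(n_grid, i, j + 1)
-- ===== SOURCE B (Python) =====
-- def regionNum(grid):
--     # Iterative flood fill with an explicit stack and a visited set over the
--     # 3x-subdivided grid; blocked cells come from a closed-form predicate on the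
--     # original characters, so no 3n x 3n matrix is ever materialized.
--     n = len(grid)
--     big = 3 * n
--
--     def blocked(r, c):
--         ch = grid[r // 3][c // 3]
--         if ch == '/':
--             return r % 3 + c % 3 == 2
--         if ch == '\\':
--             return r % 3 == c % 3
--         return False
--
--     seen = set()
--     count = 0
--     for r in range(big):
--         for c in range(big):
--             if not blocked(r, c) and (r, c) not in seen:
--                 count += 1
--                 stack = [(r, c)]
--                 while stack:
--                     x, y = stack.pop()
--                     if 0 <= x < big and 0 <= y < big and not blocked(x, y) and (x, y) not in seen:
--                         seen.add((x, y))
--                         stack.extend([(x, y + 1), (x, y - 1), (x + 1, y), (x - 1, y)])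
--     return count
-- ===== Notes on version B (the rewrite author's own statement) =====
-- stated objective: alternative
-- what changed: A materializes a 3n x 3n 0/1 matrix and counts regions with a recursive DFS that mutates the matrix; B never builds that matrix: a closed-form blocked(r,c) predicate on the original characters plus an iterative explicit-stack flood fill over a visited set.
import Mathlib
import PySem

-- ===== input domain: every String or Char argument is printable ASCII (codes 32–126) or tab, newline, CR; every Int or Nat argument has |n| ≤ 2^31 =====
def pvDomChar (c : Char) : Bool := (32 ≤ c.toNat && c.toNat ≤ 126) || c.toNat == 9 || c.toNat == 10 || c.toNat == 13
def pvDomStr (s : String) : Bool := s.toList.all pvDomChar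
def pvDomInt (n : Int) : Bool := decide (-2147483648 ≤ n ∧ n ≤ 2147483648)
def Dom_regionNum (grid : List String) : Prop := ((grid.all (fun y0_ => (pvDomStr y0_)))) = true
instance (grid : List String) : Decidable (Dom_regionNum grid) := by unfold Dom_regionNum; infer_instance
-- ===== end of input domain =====

-- B replaces A's materialized 3n x 3n matrix + recursive flood fill by a closed-form
-- "blocked" predicate on the original characters plus an explicit-stack flood fill over a
-- visited set (A mutates no argument; only the return value is compared).

-- ===== PORT A =====
-- n_grid[i][j] read; every read A performs is at an in-range non-negative index (the
-- guards precede the access), so the .getD defaults below are never the value used.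
def getCell (g : List (List Int)) (i j : Int) : Int :=
  (PySem.List.pyGet? ((PySem.List.pyGet? g i).getD []) j).getD 0

-- n_grid[i][j] = v; every write A performs is at an in-range non-negative index, so
-- .toNat is exact here.
def setCell (g : List (List Int)) (i j : Int) (v : Int) : List (List Int) :=
  g.modify i.toNat (fun row => row.set j.toNat v)

-- dfs; the fuel argument is only Lean's termination artifact (the top-level call passes
-- enough fuel for the recursion to run to completion, as the proofs below establish)
def dfsA : Nat → List (List Int) → Int → Int → List (List Int)
  | 0, g, _, _ => g
  | f+1, g, i, j =>
    if 0 ≤ i ∧ 0 ≤ j ∧ i < (g.length : Int) ∧ j < (g.length : Int) ∧ getCell g i j = 0 then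
      let g1 := setCell g i j 1
      let g2 := dfsA f g1 (i-1) j
      let g3 := dfsA f g2 (i+1) j
      let g4 := dfsA f g3 i (j-1)
      dfsA f g4 i (j+1)
    else g

def regionNum (grid : List String) : Int :=
  let nlen : Int := (grid.length : Int) * 3
  let g0 : List (List Int) :=
    (PySem.List.pyRange 0 nlen 1).map (fun _ => List.replicate nlen.toNat (0:Int))
  let g1 := (PySem.List.pyRange 0 (grid.length : Int) 1).foldl (fun g i =>
    (PySem.List.pyRange 0 (grid.length : Int) 1).foldl (fun g j =>
      let ch := (PySem.List.pyGet? grid i).bind (fun s => PySem.Str.pyGet? s j)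
      let g' := if ch = some '/' then
          setCell (setCell (setCell g (i*3+2) (j*3) 1) (i*3+1) (j*3+1) 1) (i*3) (j*3+2) 1
        else g
      if ch = some '\\' then
          setCell (setCell (setCell g' (i*3) (j*3) 1) (i*3+1) (j*3+1) 1) (i*3+2) (j*3+2) 1
        else g') g) g0
  let fuel := (5 * nlen * nlen + 1).toNat
  let res := (PySem.List.pyRange 0 nlen 1).foldl (fun (st : Int × List (List Int)) i =>
    (PySem.List.pyRange 0 nlen 1).foldl (fun (st : Int × List (List Int)) j =>
      if getCell st.2 i j = 0 then (st.1 + 1, dfsA fuel st.2 i j) else st) st) (0, g1)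
  res.1

-- ===== PORT B =====
-- closed-form blocked predicate on the subdivided grid
def blockedB (grid : List String) (r c : Int) : Bool :=
  let ch := (PySem.List.pyGet? grid (PySem.Int.floordiv r 3)).bind
      (fun s => PySem.Str.pyGet? s (PySem.Int.floordiv c 3))
  if ch = some '/' then decide (PySem.Int.mod r 3 + PySem.Int.mod c 3 = 2)
  else if ch = some '\\' then decide (PySem.Int.mod r 3 = PySem.Int.mod c 3)
  else false

def fillB (grid : List String) (big : Int) :
    Nat → PySem.Set (Int × Int) → List (Int × Int) → PySem.Set (Int × Int)
  | 0, seen, _ => seen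
  | f+1, seen, stack =>
    match PySem.List.pop? stack with
    | none => seen
    | some ((x, y), rest) =>
      if 0 ≤ x ∧ x < big ∧ 0 ≤ y ∧ y < big ∧ blockedB grid x y = false ∧
          PySem.Set.contains seen (x, y) = false then
        fillB grid big f (PySem.Set.add seen (x, y))
          (rest ++ [(x, y+1), (x, y-1), (x+1, y), (x-1, y)])
      else fillB grid big f seen rest

def regionNum_alt (grid : List String) : Int :=
  let n : Int := (grid.length : Int)
  let big : Int := 3 * n
  let fuel := (5 * big * big + 1).toNat
  let res := (PySem.List.pyRange 0 big 1).foldl (fun (st : Int × PySem.Set (Int × Int)) r =>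
    (PySem.List.pyRange 0 big 1).foldl (fun (st : Int × PySem.Set (Int × Int)) c =>
      if blockedB grid r c = false ∧ PySem.Set.contains st.2 (r, c) = false then
        (st.1 + 1, fillB grid big fuel st.2 [(r, c)])
      else st) st) (0, PySem.Set.empty)
  res.1

-- ===== PRECONDITION & SPEC =====
-- Pre_ excludes exactly the grids that have a row shorter than the number of rows: on
-- those A's grid[i][j] raises IndexError (B raises there too).
def Pre_regionNum (grid : List String) : Prop :=
  ∀ s ∈ grid, (grid.length : Int) ≤ PySem.Str.len s
instance (grid : List String) : Decidable (Pre_regionNum grid) := by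
  unfold Pre_regionNum; infer_instance

def pvWitness_regionNum : List String := ["/\\", " /"]

def Spec_regionNum (grid : List String) (out : Int) : Prop := out = regionNum_alt grid
instance (grid : List String) (out : Int) : Decidable (Spec_regionNum grid out) := by
  unfold Spec_regionNum; infer_instance

-- ===== CLAIM (what is proved, stated in full; the proofs are below) =====
def Claim_equal_regionNum : Prop :=
  ∀ (grid : List String), Dom_regionNum grid → Pre_regionNum grid →
    Spec_regionNum grid (regionNum grid)

-- ===== LEMMAS AND PROOFS =====
def inb (N : Int) (c : Int × Int) : Bool :=
  decide (0 ≤ c.1 ∧ c.1 < N ∧ 0 ≤ c.2 ∧ c.2 < N)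
def nbrs (c : Int × Int) : List (Int × Int) :=
  [(c.1 - 1, c.2), (c.1 + 1, c.2), (c.1, c.2 - 1), (c.1, c.2 + 1)]
def mark (s : Int × Int → Bool) (c : Int × Int) : Int × Int → Bool :=
  fun c' => if c' = c then false else s c'
def proc : Nat → (Int × Int → Bool) → List (Int × Int) → (Int × Int → Bool)
  | 0, s, _ => s
  | _+1, s, [] => s
  | f+1, s, c :: rest => if s c then proc f (mark s c) (nbrs c ++ rest) else proc f s rest
def cellList (N : Int) : List (Int × Int) :=
  (PySem.List.pyRange 0 N 1) ×ˢ (PySem.List.pyRange 0 N 1)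
def Zc (N : Int) (s : Int × Int → Bool) : Nat := (cellList N).countP s
def Bnd (N : Int) (s : Int × Int → Bool) : Prop := ∀ c, s c = true → inb N c = true
lemma mem_cellList {N : Int} {c : Int × Int} : c ∈ cellList N ↔ inb N c = true := by
  obtain ⟨a, b⟩ := c
  simp [cellList, inb, PySem.List.mem_pyRange_one, and_assoc]
lemma nodup_cellList (N : Int) : (cellList N).Nodup :=
  List.Nodup.product (PySem.List.nodup_pyRange_one 0 N) (PySem.List.nodup_pyRange_one 0 N)
lemma Bnd_mark {N : Int} {s : Int × Int → Bool} (h : Bnd N s) (c : Int × Int) :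
    Bnd N (mark s c) := by
  intro c' hc'
  by_cases h' : c' = c
  · simp [mark, h'] at hc'
  · simp [mark, h'] at hc'; exact h _ hc'

lemma countP_mark {s : Int × Int → Bool} {c : Int × Int} :
    ∀ (l : List (Int × Int)), l.Nodup → c ∈ l → s c = true →
      l.countP (mark s c) + 1 = l.countP s
  | [], _, hc, _ => absurd hc (List.not_mem_nil)
  | x :: rest, hl, hc, hs => by
    rcases List.mem_cons.mp hc with hx | hx
    · subst hx
      have hnot : c ∉ rest := (List.nodup_cons.mp hl).1
      have : rest.countP (mark s c) = rest.countP s := by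
        apply List.countP_congr
        intro y hy
        have : y ≠ c := fun h => hnot (h ▸ hy)
        simp [mark, this]
      simp [List.countP_cons, mark, hs, this]
    · have hxc : x ≠ c := fun h => (List.nodup_cons.mp hl).1 (h ▸ hx)
      have ih := countP_mark rest (List.nodup_cons.mp hl).2 hx hs
      simp [List.countP_cons, mark, hxc]
      omega

lemma Zc_mark {N : Int} {s : Int × Int → Bool} {c : Int × Int}
    (hs : s c = true) (hb : Bnd N s) : Zc N (mark s c) + 1 = Zc N s :=
  countP_mark _ (nodup_cellList N) (mem_cellList.mpr (hb c hs)) hs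

lemma Zc_mark_le {N : Int} (s : Int × Int → Bool) (c : Int × Int) :
    Zc N (mark s c) ≤ Zc N s := by
  apply List.countP_mono_left
  intro x hx h
  by_cases h' : x = c <;> simp [mark, h'] at h ⊢
  exact h

lemma proc_nil (f : Nat) (s : Int × Int → Bool) : proc f s [] = s := by
  cases f <;> rfl

lemma proc_cons (f : Nat) (s : Int × Int → Bool) (c : Int × Int) (rest : List (Int × Int)) :
    proc (f+1) s (c :: rest) =
      if s c then proc f (mark s c) (nbrs c ++ rest) else proc f s rest := rfl

lemma proc_Bnd {N : Int} : ∀ (f : Nat) (s : Int × Int → Bool) (p : List (Int × Int)),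
    Bnd N s → Bnd N (proc f s p)
  | 0, s, p, h => h
  | f+1, s, [], h => h
  | f+1, s, c :: rest, h => by
    unfold proc
    by_cases hc : s c = true
    · simp [hc]; exact proc_Bnd f _ _ (Bnd_mark h c)
    · simp [hc]; exact proc_Bnd f _ _ h

lemma Zc_proc_le {N : Int} : ∀ (f : Nat) (s : Int × Int → Bool) (p : List (Int × Int)),
    Zc N (proc f s p) ≤ Zc N s
  | 0, s, p => le_refl _
  | f+1, s, [] => le_refl _
  | f+1, s, c :: rest => by
    rw [proc_cons]
    by_cases hc : s c = true
    · simp only [hc, if_true]; exact le_trans (Zc_proc_le f _ _) (Zc_mark_le s c)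
    · simp only [hc, if_false]; exact Zc_proc_le f s rest

lemma proc_stab {N : Int} : ∀ (f g : Nat) (s : Int × Int → Bool) (p : List (Int × Int)),
    Bnd N s → 5 * Zc N s + p.length ≤ f → 5 * Zc N s + p.length ≤ g →
    proc f s p = proc g s p := by
  intro f
  induction f with
  | zero => intro g s p _ hf _; cases p with
    | nil => rw [proc_nil, proc_nil]
    | cons c rest => simp at hf
  | succ f ih =>
    intro g s p hb hf hg
    cases p with
    | nil => rw [proc_nil, proc_nil]
    | cons c rest =>
      have hg1 : ∃ g', g = g' + 1 := by
        rcases g with _ | g'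
        · simp at hg
        · exact ⟨g', rfl⟩
      obtain ⟨g', rfl⟩ := hg1
      rw [proc_cons, proc_cons]
      by_cases hc : s c = true
      · simp only [hc, if_true]
        have hz := Zc_mark (N := N) hc hb
        apply ih g' _ _ (Bnd_mark hb c)
        · simp [nbrs] at *; omega
        · simp [nbrs] at *; omega
      · simp only [hc, if_false]
        apply ih g' _ _ hb
        · simp at *; omega
        · simp at *; omega

lemma proc_append {N : Int} : ∀ (f : Nat) (s : Int × Int → Bool) (l1 l2 : List (Int × Int)),
    Bnd N s → 5 * Zc N s + l1.length + l2.length ≤ f →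
    proc f s (l1 ++ l2) = proc f (proc f s l1) l2 := by
  intro f
  induction f with
  | zero =>
    intro s l1 l2 hb hf
    cases l1 with
    | nil => simp [proc_nil]
    | cons c rest => simp at hf
  | succ f ih =>
    intro s l1 l2 hb hf
    cases l1 with
    | nil => simp [proc_nil]
    | cons c l1' =>
      have hlen : (c :: l1').length = l1'.length + 1 := by simp
      by_cases hc : s c = true
      · have hz := Zc_mark (N := N) hc hb
        have step : proc (f+1) s ((c :: l1') ++ l2) = proc f (mark s c) ((nbrs c ++ l1') ++ l2) := by
          simp only [List.cons_append]
          rw [proc_cons, if_pos hc, List.append_assoc]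
        rw [step]
        have hb' := Bnd_mark hb c
        rw [ih _ _ _ hb' (by simp [nbrs] at *; omega)]
        have inner : proc (f+1) s (c :: l1') = proc f (mark s c) (nbrs c ++ l1') := by
          rw [proc_cons, if_pos hc]
        rw [inner]
        apply proc_stab (N := N)
        · exact proc_Bnd _ _ _ hb'
        · have := Zc_proc_le (N := N) f (mark s c) (nbrs c ++ l1')
          simp at *; omega
        · have := Zc_proc_le (N := N) f (mark s c) (nbrs c ++ l1')
          simp at *; omega
      · have step : proc (f+1) s ((c :: l1') ++ l2) = proc f s (l1' ++ l2) := by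
          simp only [List.cons_append]
          rw [proc_cons, if_neg (by simp [hc])]
        rw [step]
        rw [ih _ _ _ hb (by simp at *; omega)]
        have inner : proc (f+1) s (c :: l1') = proc f s l1' := by
          rw [proc_cons, if_neg (by simp [hc])]
        rw [inner]
        apply proc_stab (N := N)
        · exact proc_Bnd _ _ _ hb
        · have := Zc_proc_le (N := N) f s l1'
          simp at *; omega
        · have := Zc_proc_le (N := N) f s l1'
          simp at *; omega

def Shape (N : Int) (g : List (List Int)) : Prop :=
  (g.length : Int) = N ∧ ∀ row ∈ g, (row.length : Int) = N
def absA (N : Int) (g : List (List Int)) : Int × Int → Bool :=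
  fun c => inb N c && (getCell g c.1 c.2 == 0)
lemma Bnd_absA (N : Int) (g : List (List Int)) : Bnd N (absA N g) := by
  intro c hc; simp [absA] at hc; exact hc.1

lemma getCell_eq {N : Int} {g : List (List Int)} {r c : Int}
    (hg : Shape N g) (hrc : inb N (r, c) = true) :
    ∃ row, g[r.toNat]? = some row ∧ (row.length : Int) = N ∧
      getCell g r c = row[c.toNat]?.getD 0 := by
  simp [inb] at hrc
  obtain ⟨h1, h2, h3, h4⟩ := hrc
  have hlen := hg.1
  have hr : r.toNat < g.length := by omega
  have hrow : g[r.toNat]? = some g[r.toNat] := List.getElem?_eq_getElem hr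
  refine ⟨g[r.toNat], hrow, hg.2 _ (List.getElem_mem hr), ?_⟩
  have e1 : PySem.List.pyGet? g r = some g[r.toNat] := by
    rw [PySem.List.pyGet?_of_nonneg g h1, hrow]
  rw [getCell, e1]
  simp only [Option.getD_some]
  rw [PySem.List.pyGet?_of_nonneg _ h3]

lemma length_setCell (g : List (List Int)) (i j v : Int) :
    (setCell g i j v).length = g.length := by
  simp [setCell]

lemma Shape_setCell {N : Int} {g : List (List Int)} {i j : Int}
    (hg : Shape N g) (v : Int) : Shape N (setCell g i j v) := by
  constructor
  · rw [length_setCell]; exact hg.1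
  · intro row hrow
    obtain ⟨k, hk, hget⟩ := List.getElem_of_mem hrow
    have hk' : (setCell g i j v)[k]? = some row := by
      rw [List.getElem?_eq_getElem hk, hget]
    rw [setCell, List.getElem?_modify] at hk'
    have hkg : k < g.length := by rwa [length_setCell] at hk
    rw [List.getElem?_eq_getElem hkg] at hk'
    rw [Option.map_eq_map, Option.map_some] at hk'
    replace hk' := Option.some.inj hk'
    have hmem : g[k] ∈ g := List.getElem_mem hkg
    have hlen := hg.2 _ hmem
    by_cases h : i.toNat = k
    · simp [h] at hk'
      rw [← hk']
      simpa using hlen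
    · simp [h] at hk'
      rw [← hk']
      exact hlen

lemma getCell_setCell {N : Int} {g : List (List Int)} {i j r c v : Int}
    (hg : Shape N g) (hij : inb N (i, j) = true) (hrc : inb N (r, c) = true) :
    getCell (setCell g i j v) r c = if r = i ∧ c = j then v else getCell g r c := by
  obtain ⟨row, hrow, hrowlen, hget⟩ := getCell_eq hg hrc
  obtain ⟨row', hrow', hrowlen', hget'⟩ := getCell_eq (Shape_setCell hg v) hrc
  simp [inb] at hij hrc
  rw [hget']
  have hmod : (setCell g i j v)[r.toNat]? = some (if i.toNat = r.toNat then row.set j.toNat v else row) := by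
    rw [setCell, List.getElem?_modify, hrow]
    by_cases h : i.toNat = r.toNat <;> simp [h]
  rw [hmod] at hrow'
  have hrow'' : row' = if i.toNat = r.toNat then row.set j.toNat v else row :=
    (Option.some.inj hrow').symm
  by_cases hri : r = i
  · have hnat : i.toNat = r.toNat := by omega
    rw [hrow'', if_pos hnat]
    by_cases hcj : c = j
    · have hjc : j.toNat = c.toNat := by omega
      have hb : j.toNat < row.length := by omega
      rw [List.getElem?_set, if_pos hjc, if_pos hb]
      simp [hri, hcj]
    · have hne : j.toNat ≠ c.toNat := by omega
      rw [List.getElem?_set, if_neg hne, if_neg (by tauto), hget]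
  · have hnat : i.toNat ≠ r.toNat := by omega
    rw [hrow'', if_neg hnat, if_neg (by tauto), hget]

lemma absA_setCell {N : Int} {g : List (List Int)} {i j : Int}
    (hg : Shape N g) (hij : inb N (i, j) = true) :
    absA N (setCell g i j 1) = mark (absA N g) (i, j) := by
  funext c
  obtain ⟨r, c'⟩ := c
  by_cases hc : inb N (r, c') = true
  · simp only [absA, mark]
    rw [getCell_setCell hg hij hc]
    by_cases h : (r, c') = (i, j)
    · have h' : r = i ∧ c' = j := by simpa using h
      simp [h']
    · have h' : ¬(r = i ∧ c' = j) := by simpa using h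
      rw [if_neg h', if_neg h]
  · have hcf : inb N (r, c') = false := by simpa using hc
    simp only [absA, mark, hcf, Bool.false_and]
    split <;> rfl


lemma dfsA_succ (f : Nat) (g : List (List Int)) (i j : Int) :
    dfsA (f+1) g i j =
      if 0 ≤ i ∧ 0 ≤ j ∧ i < (g.length : Int) ∧ j < (g.length : Int) ∧ getCell g i j = 0 then
        dfsA f (dfsA f (dfsA f (dfsA f (setCell g i j 1) (i-1) j) (i+1) j) i (j-1)) i (j+1)
      else g := rfl

lemma condA {N : Int} {g : List (List Int)} {i j : Int} (hg : Shape N g) :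
    ((0:Int) ≤ i ∧ 0 ≤ j ∧ i < (g.length : Int) ∧ j < (g.length : Int) ∧ getCell g i j = 0)
      ↔ absA N g (i, j) = true := by
  simp [absA, inb, hg.1]
  tauto

lemma dfsA_proc {N : Int} : ∀ (f : Nat) (g : List (List Int)) (i j : Int),
    Shape N g → 5 * Zc N (absA N g) + 1 ≤ f →
    absA N (dfsA f g i j) = proc f (absA N g) [(i, j)] ∧ Shape N (dfsA f g i j) := by
  intro f
  induction f with
  | zero => intro g i j _ hf; omega
  | succ f ih =>
    intro g i j hg hf
    rw [dfsA_succ, proc_cons]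
    by_cases hC : (0:Int) ≤ i ∧ 0 ≤ j ∧ i < (g.length : Int) ∧ j < (g.length : Int) ∧ getCell g i j = 0
    · have hsij : absA N g (i, j) = true := (condA hg).mp hC
      rw [if_pos hC, if_pos hsij]
      have hij : inb N (i, j) = true := by
        have := hg.1; simp [inb]; omega
      have habs1 : absA N (setCell g i j 1) = mark (absA N g) (i, j) := absA_setCell hg hij
      have hg1 : Shape N (setCell g i j 1) := Shape_setCell hg 1
      have hz := Zc_mark (N := N) hsij (Bnd_absA N g)
      have hbm : Bnd N (mark (absA N g) (i, j)) := Bnd_mark (Bnd_absA N g) _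
      -- four sequential recursive calls
      obtain ⟨e2, hs2⟩ := ih (setCell g i j 1) (i-1) j hg1 (by rw [habs1]; omega)
      set g2 := dfsA f (setCell g i j 1) (i-1) j with hg2def
      have z2 : Zc N (absA N g2) ≤ Zc N (absA N g) - 1 := by
        rw [e2, habs1]
        have := Zc_proc_le (N := N) f (mark (absA N g) (i, j)) [(i-1, j)]
        omega
      obtain ⟨e3, hs3⟩ := ih g2 (i+1) j hs2 (by omega)
      set g3 := dfsA f g2 (i+1) j with hg3def
      have z3 : Zc N (absA N g3) ≤ Zc N (absA N g) - 1 := by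
        rw [e3]
        have := Zc_proc_le (N := N) f (absA N g2) [(i+1, j)]
        omega
      obtain ⟨e4, hs4⟩ := ih g3 i (j-1) hs3 (by omega)
      set g4 := dfsA f g3 i (j-1) with hg4def
      have z4 : Zc N (absA N g4) ≤ Zc N (absA N g) - 1 := by
        rw [e4]
        have := Zc_proc_le (N := N) f (absA N g3) [(i, j-1)]
        omega
      obtain ⟨e5, hs5⟩ := ih g4 i (j+1) hs4 (by omega)
      refine ⟨?_, hs5⟩
      rw [e5, e4, e3, e2, habs1]
      -- collapse nested proc's into one worklist
      have hn : nbrs (i, j) ++ ([] : List (Int × Int)) = [(i-1,j)] ++ [(i+1,j), (i,j-1), (i,j+1)] := by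
        simp [nbrs]
      rw [hn]
      rw [proc_append (N := N) f _ [(i-1,j)] [(i+1,j), (i,j-1), (i,j+1)] hbm (by simp; omega)]
      have hb1 : Bnd N (proc f (mark (absA N g) (i, j)) [(i-1,j)]) := proc_Bnd f _ _ hbm
      have zz1 : Zc N (proc f (mark (absA N g) (i, j)) [(i-1,j)]) ≤ Zc N (absA N g) - 1 := by
        have := Zc_proc_le (N := N) f (mark (absA N g) (i, j)) [(i-1,j)]
        omega
      rw [show [(i+1,j), (i,j-1), (i,j+1)] = [((i+1 : Int),(j : Int))] ++ [(i,j-1), (i,j+1)] from rfl]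
      rw [proc_append (N := N) f _ [(i+1,j)] [(i,j-1), (i,j+1)] hb1 (by simp; omega)]
      have hb2 : Bnd N (proc f (proc f (mark (absA N g) (i, j)) [(i-1,j)]) [(i+1,j)]) := proc_Bnd f _ _ hb1
      have zz2 : Zc N (proc f (proc f (mark (absA N g) (i, j)) [(i-1,j)]) [(i+1,j)]) ≤ Zc N (absA N g) - 1 := by
        have := Zc_proc_le (N := N) f (proc f (mark (absA N g) (i, j)) [(i-1,j)]) [(i+1,j)]
        omega
      rw [show [(i,j-1), (i,j+1)] = [((i : Int),(j-1 : Int))] ++ [(i,j+1)] from rfl]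
      rw [proc_append (N := N) f _ [(i,j-1)] [(i,j+1)] hb2 (by simp; omega)]
    · have hsij : absA N g (i, j) = false := by
        rcases Bool.eq_false_or_eq_true (absA N g (i, j)) with h | h
        · exact absurd ((condA hg).mpr h) hC
        · exact h
      rw [if_neg hC, if_neg (by simp [hsij]), proc_nil]
      exact ⟨rfl, hg⟩
def absB (grid : List String) (N : Int) (seen : PySem.Set (Int × Int)) : Int × Int → Bool :=
  fun c => inb N c && !blockedB grid c.1 c.2 && !(PySem.Set.contains seen c)

lemma fillB_succ (grid : List String) (big : Int) (f : Nat)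
    (seen : PySem.Set (Int × Int)) (stack : List (Int × Int)) :
    fillB grid big (f+1) seen stack =
      match PySem.List.pop? stack with
      | none => seen
      | some ((x, y), rest) =>
        if 0 ≤ x ∧ x < big ∧ 0 ≤ y ∧ y < big ∧ blockedB grid x y = false ∧
            PySem.Set.contains seen (x, y) = false then
          fillB grid big f (PySem.Set.add seen (x, y))
            (rest ++ [(x, y+1), (x, y-1), (x+1, y), (x-1, y)])
        else fillB grid big f seen rest := rfl

lemma contains_iff (s : PySem.Set (Int × Int)) (c : Int × Int) :
    PySem.Set.contains s c = true ↔ c ∈ s := by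
  simp [PySem.Set.contains]

lemma absB_add (grid : List String) (N : Int) (seen : PySem.Set (Int × Int)) (c : Int × Int) :
    absB grid N (PySem.Set.add seen c) = mark (absB grid N seen) c := by
  funext c'
  have hmem : PySem.Set.contains (PySem.Set.add seen c) c' = true ↔ (c' ∈ seen ∨ c' = c) := by
    rw [contains_iff]
    exact PySem.Set.mem_add seen c c'
  by_cases h : c' = c
  · subst h
    have : PySem.Set.contains (PySem.Set.add seen c') c' = true := hmem.mpr (Or.inr rfl)
    simp [absB, mark, this]
  · have hiff : (PySem.Set.contains (PySem.Set.add seen c) c' = true) ↔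
        (PySem.Set.contains seen c' = true) := by
      rw [hmem, contains_iff]
      constructor
      · rintro (hm | hm)
        · exact hm
        · exact absurd hm h
      · exact Or.inl
    have : PySem.Set.contains (PySem.Set.add seen c) c' = PySem.Set.contains seen c' := by
      cases hcs : PySem.Set.contains seen c' with
      | true => exact hiff.mpr hcs
      | false =>
        cases hca : PySem.Set.contains (PySem.Set.add seen c) c' with
        | false => rfl
        | true => exact absurd (hiff.mp hca) (by intro hm; rw [hm] at hcs; cases hcs)
    simp [absB, mark, h, this]

lemma fillB_proc (grid : List String) (N : Int) :
    ∀ (f : Nat) (seen : PySem.Set (Int × Int)) (st : List (Int × Int)),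
    absB grid N (fillB grid N f seen st) = proc f (absB grid N seen) st.reverse := by
  intro f
  induction f with
  | zero => intro seen st; rfl
  | succ f ih =>
    intro seen st
    rcases List.eq_nil_or_concat st with h | ⟨ys, c, h⟩
    · subst h
      simp only [List.reverse_nil, proc_nil]
      rfl
    · subst h
      obtain ⟨x, y⟩ := c
      rw [List.concat_eq_append]
      have hpop : PySem.List.pop? (ys ++ [(x, y)]) = some ((x, y), ys) :=
        PySem.List.pop?_last ys (x, y)
      have hrev : (ys ++ [(x, y)]).reverse = (x, y) :: ys.reverse := by simp
      have step : fillB grid N (f+1) seen (ys ++ [(x, y)]) =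
          (if 0 ≤ x ∧ x < N ∧ 0 ≤ y ∧ y < N ∧ blockedB grid x y = false ∧
              PySem.Set.contains seen (x, y) = false then
            fillB grid N f (PySem.Set.add seen (x, y))
              (ys ++ [(x, y+1), (x, y-1), (x+1, y), (x-1, y)])
          else fillB grid N f seen ys) := by
        rw [fillB_succ, hpop]
      rw [hrev, proc_cons, step]
      by_cases hC : 0 ≤ x ∧ x < N ∧ 0 ≤ y ∧ y < N ∧ blockedB grid x y = false ∧
          PySem.Set.contains seen (x, y) = false
      · have habs : absB grid N seen (x, y) = true := by
          obtain ⟨h1, h2, h3, h4, h5, h6⟩ := hC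
          simp only [absB, inb]
          rw [h5, h6]
          simp
          omega
        rw [if_pos hC, if_pos habs, ih]
        rw [absB_add]
        congr 1
        simp [nbrs]
      · have habs : absB grid N seen (x, y) = false := by
          cases habs0 : absB grid N seen (x, y) with
          | false => rfl
          | true =>
            exfalso
            simp [absB, inb] at habs0
            obtain ⟨⟨⟨hx1, hx2, hy1, hy2⟩, hbl⟩, hct⟩ := habs0
            refine hC ⟨hx1, hx2, hy1, hy2, by simpa using hbl, ?_⟩
            cases hcv : PySem.Set.contains seen (x, y) with
            | false => rfl
            | true => exact absurd ((contains_iff _ _).mp hcv) hct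
        rw [if_neg hC, if_neg (by simp [habs]), ih]

-- ===== builder =====
def buildBody (grid : List String) (g : List (List Int)) (i j : Int) : List (List Int) :=
  let ch := (PySem.List.pyGet? grid i).bind (fun s => PySem.Str.pyGet? s j)
  let g' := if ch = some '/' then
      setCell (setCell (setCell g (i*3+2) (j*3) 1) (i*3+1) (j*3+1) 1) (i*3) (j*3+2) 1
    else g
  if ch = some '\\' then
      setCell (setCell (setCell g' (i*3) (j*3) 1) (i*3+1) (j*3+1) 1) (i*3+2) (j*3+2) 1
    else g'

lemma ch_some {grid : List String} (hpre : Pre_regionNum grid) {i j : Int}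
    (hi : 0 ≤ i ∧ i < (grid.length : Int)) (hj : 0 ≤ j ∧ j < (grid.length : Int)) :
    ∃ chv, (PySem.List.pyGet? grid i).bind (fun s => PySem.Str.pyGet? s j) = some chv := by
  have hlt : i.toNat < grid.length := by omega
  have hrow : PySem.List.pyGet? grid i = some grid[i.toNat] := by
    rw [PySem.List.pyGet?_of_nonneg grid hi.1, List.getElem?_eq_getElem hlt]
  have hlen := hpre grid[i.toNat] (List.getElem_mem hlt)
  rw [PySem.Str.len_eq] at hlen
  have hjl : j.toNat < grid[i.toNat].toList.length := by omega
  refine ⟨grid[i.toNat].toList[j.toNat], ?_⟩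
  rw [hrow]
  simp [PySem.List.pyGet?_of_nonneg _ hj.1]

lemma blockedB_at {grid : List String} {i j r c : Int} {chv : Char}
    (hch : (PySem.List.pyGet? grid i).bind (fun s => PySem.Str.pyGet? s j) = some chv)
    (hr : PySem.Int.floordiv r 3 = i) (hc : PySem.Int.floordiv c 3 = j) :
    blockedB grid r c =
      (if chv = '/' then decide (PySem.Int.mod r 3 + PySem.Int.mod c 3 = 2)
       else if chv = '\\' then decide (PySem.Int.mod r 3 = PySem.Int.mod c 3)
       else false) := by
  rw [blockedB]
  simp only [hr, hc, hch]
  by_cases h1 : chv = '/'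
  · simp [h1]
  · by_cases h2 : chv = '\\'
    · simp [h1, h2]
    · simp [h1, h2]

lemma fd3 (a : Int) : PySem.Int.floordiv a 3 = a / 3 :=
  PySem.Int.floordiv_eq_ediv_of_pos (by norm_num)

lemma md3 (a : Int) : PySem.Int.mod a 3 = a % 3 :=
  PySem.Int.mod_eq_emod_of_pos (by norm_num)

lemma blockedB_at_slash {grid : List String} {i j r c : Int}
    (hch : (PySem.List.pyGet? grid i).bind (fun s => PySem.Str.pyGet? s j) = some '/')
    (hr : PySem.Int.floordiv r 3 = i) (hc : PySem.Int.floordiv c 3 = j) :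
    blockedB grid r c = decide (r % 3 + c % 3 = 2) := by
  rw [blockedB_at hch hr hc]
  simp [md3]

lemma blockedB_at_backslash {grid : List String} {i j r c : Int}
    (hch : (PySem.List.pyGet? grid i).bind (fun s => PySem.Str.pyGet? s j) = some '\\')
    (hr : PySem.Int.floordiv r 3 = i) (hc : PySem.Int.floordiv c 3 = j) :
    blockedB grid r c = decide (r % 3 = c % 3) := by
  rw [blockedB_at hch hr hc]
  simp [md3]

lemma build_step {n N : Int} (grid : List String) (hN : N = 3 * n)
    (hn : (grid.length : Int) = n) (hpre : Pre_regionNum grid) {g : List (List Int)}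
    (hg : Shape N g) {i j : Int} (hi : 0 ≤ i ∧ i < n) (hj : 0 ≤ j ∧ j < n) :
    Shape N (buildBody grid g i j) ∧ ∀ r c, inb N (r, c) = true →
      getCell (buildBody grid g i j) r c =
        if (decide (PySem.Int.floordiv r 3 = i) && decide (PySem.Int.floordiv c 3 = j) &&
            blockedB grid r c) = true then 1 else getCell g r c := by
  obtain ⟨chv, hch⟩ := ch_some hpre (i := i) (j := j) (by omega) (by omega)
  have hinb1 : inb N (i*3+2, j*3) = true := by simp [inb]; omega
  have hinb2 : inb N (i*3+1, j*3+1) = true := by simp [inb]; omega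
  have hinb3 : inb N (i*3, j*3+2) = true := by simp [inb]; omega
  have hinb4 : inb N (i*3, j*3) = true := by simp [inb]; omega
  have hinb5 : inb N (i*3+2, j*3+2) = true := by simp [inb]; omega
  by_cases h1 : chv = '/'
  · subst h1
    have hbody : buildBody grid g i j =
        setCell (setCell (setCell g (i*3+2) (j*3) 1) (i*3+1) (j*3+1) 1) (i*3) (j*3+2) 1 := by
      simp only [buildBody]
      rw [hch]
      simp
    rw [hbody]
    have hs1 := Shape_setCell (N := N) hg (v := 1) (i := i*3+2) (j := j*3)
    have hs2 := Shape_setCell (N := N) hs1 (v := 1) (i := i*3+1) (j := j*3+1)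
    have hs3 := Shape_setCell (N := N) hs2 (v := 1) (i := i*3) (j := j*3+2)
    refine ⟨hs3, ?_⟩
    have key : ∀ r c, ((decide (PySem.Int.floordiv r 3 = i) &&
        decide (PySem.Int.floordiv c 3 = j) && blockedB grid r c) = true) ↔
        ((r = i*3+2 ∧ c = j*3) ∨ (r = i*3+1 ∧ c = j*3+1) ∨ (r = i*3 ∧ c = j*3+2)) := by
      intro r c
      constructor
      · intro h
        simp only [Bool.and_eq_true, decide_eq_true_eq] at h
        obtain ⟨⟨h1', h2'⟩, h3'⟩ := h
        rw [blockedB_at_slash hch h1' h2'] at h3'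
        simp only [decide_eq_true_eq] at h3'
        rw [fd3] at h1' h2'
        omega
      · intro h
        have e1 : PySem.Int.floordiv r 3 = i := by
          rw [fd3]; rcases h with ⟨h, h'⟩ | ⟨h, h'⟩ | ⟨h, h'⟩ <;> omega
        have e2 : PySem.Int.floordiv c 3 = j := by
          rw [fd3]; rcases h with ⟨h, h'⟩ | ⟨h, h'⟩ | ⟨h, h'⟩ <;> omega
        rw [blockedB_at_slash hch e1 e2]
        simp only [Bool.and_eq_true, decide_eq_true_eq]
        refine ⟨⟨e1, e2⟩, ?_⟩
        rcases h with ⟨h, h'⟩ | ⟨h, h'⟩ | ⟨h, h'⟩ <;> omega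
    intro r c hrc
    rw [getCell_setCell hs2 hinb3 hrc, getCell_setCell hs1 hinb2 hrc,
        getCell_setCell hg hinb1 hrc]
    by_cases hco : (decide (PySem.Int.floordiv r 3 = i) &&
        decide (PySem.Int.floordiv c 3 = j) && blockedB grid r c) = true
    · rw [if_pos hco]
      rcases (key r c).mp hco with ⟨h, h'⟩ | ⟨h, h'⟩ | ⟨h, h'⟩ <;> subst h <;> subst h' <;>
        split_ifs <;> first | rfl | omega
    · rw [if_neg hco]
      have n1 : ¬(r = i*3 ∧ c = j*3+2) := fun h => hco ((key r c).mpr (Or.inr (Or.inr h)))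
      have n2 : ¬(r = i*3+1 ∧ c = j*3+1) := fun h => hco ((key r c).mpr (Or.inr (Or.inl h)))
      have n3 : ¬(r = i*3+2 ∧ c = j*3) := fun h => hco ((key r c).mpr (Or.inl h))
      rw [if_neg n1, if_neg n2, if_neg n3]
  · by_cases h2 : chv = '\\'
    · subst h2
      have hbody : buildBody grid g i j =
          setCell (setCell (setCell g (i*3) (j*3) 1) (i*3+1) (j*3+1) 1) (i*3+2) (j*3+2) 1 := by
        simp only [buildBody]
        rw [hch]
        simp
      rw [hbody]
      have hs1 := Shape_setCell (N := N) hg (v := 1) (i := i*3) (j := j*3)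
      have hs2 := Shape_setCell (N := N) hs1 (v := 1) (i := i*3+1) (j := j*3+1)
      have hs3 := Shape_setCell (N := N) hs2 (v := 1) (i := i*3+2) (j := j*3+2)
      refine ⟨hs3, ?_⟩
      have key : ∀ r c, ((decide (PySem.Int.floordiv r 3 = i) &&
          decide (PySem.Int.floordiv c 3 = j) && blockedB grid r c) = true) ↔
          ((r = i*3 ∧ c = j*3) ∨ (r = i*3+1 ∧ c = j*3+1) ∨ (r = i*3+2 ∧ c = j*3+2)) := by
        intro r c
        constructor
        · intro h
          simp only [Bool.and_eq_true, decide_eq_true_eq] at h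
          obtain ⟨⟨h1', h2'⟩, h3'⟩ := h
          rw [blockedB_at_backslash hch h1' h2'] at h3'
          simp only [decide_eq_true_eq] at h3'
          rw [fd3] at h1' h2'
          omega
        · intro h
          have e1 : PySem.Int.floordiv r 3 = i := by
            rw [fd3]; rcases h with ⟨h, h'⟩ | ⟨h, h'⟩ | ⟨h, h'⟩ <;> omega
          have e2 : PySem.Int.floordiv c 3 = j := by
            rw [fd3]; rcases h with ⟨h, h'⟩ | ⟨h, h'⟩ | ⟨h, h'⟩ <;> omega
          rw [blockedB_at_backslash hch e1 e2]
          simp only [Bool.and_eq_true, decide_eq_true_eq]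
          refine ⟨⟨e1, e2⟩, ?_⟩
          rcases h with ⟨h, h'⟩ | ⟨h, h'⟩ | ⟨h, h'⟩ <;> omega
      intro r c hrc
      rw [getCell_setCell hs2 hinb5 hrc, getCell_setCell hs1 hinb2 hrc,
          getCell_setCell hg hinb4 hrc]
      by_cases hco : (decide (PySem.Int.floordiv r 3 = i) &&
          decide (PySem.Int.floordiv c 3 = j) && blockedB grid r c) = true
      · rw [if_pos hco]
        rcases (key r c).mp hco with ⟨h, h'⟩ | ⟨h, h'⟩ | ⟨h, h'⟩ <;> subst h <;> subst h' <;>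
          split_ifs <;> first | rfl | omega
      · rw [if_neg hco]
        have n1 : ¬(r = i*3+2 ∧ c = j*3+2) := fun h => hco ((key r c).mpr (Or.inr (Or.inr h)))
        have n2 : ¬(r = i*3+1 ∧ c = j*3+1) := fun h => hco ((key r c).mpr (Or.inr (Or.inl h)))
        have n3 : ¬(r = i*3 ∧ c = j*3) := fun h => hco ((key r c).mpr (Or.inl h))
        rw [if_neg n1, if_neg n2, if_neg n3]
    · have hbody : buildBody grid g i j = g := by
        simp only [buildBody]
        rw [hch]
        simp [h1, h2]
      rw [hbody]
      refine ⟨hg, ?_⟩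
      intro r c hrc
      by_cases hd : PySem.Int.floordiv r 3 = i ∧ PySem.Int.floordiv c 3 = j
      · rw [blockedB_at hch hd.1 hd.2]
        simp [h1, h2]
      · have hdf : (decide (PySem.Int.floordiv r 3 = i) && decide (PySem.Int.floordiv c 3 = j) &&
            blockedB grid r c) = false := by
          rcases Decidable.not_and_iff_not_or_not.mp hd with h | h
          · simp only [decide_eq_false h, Bool.false_and]
          · simp only [decide_eq_false h, Bool.and_false, Bool.false_and]
        rw [hdf]
        simp

-- ===== counting loops =====
lemma Zc_le (N : Int) (s : Int × Int → Bool) : Zc N s ≤ N.toNat * N.toNat := by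
  have h1 : Zc N s ≤ (cellList N).length := List.countP_le_length
  have h2 : (cellList N).length = N.toNat * N.toNat := by
    simp [cellList, List.length_product, PySem.List.length_pyRange_one]
  omega

lemma count_inner (grid : List String) (N : Int) (FA FB : Nat)
    (hFA : 5 * (N.toNat * N.toNat) + 1 ≤ FA) (hFB : 5 * (N.toNat * N.toNat) + 1 ≤ FB) :
    ∀ (js : List Int) (i : Int) (stA : Int × List (List Int))
      (stB : Int × PySem.Set (Int × Int)),
      (∀ j ∈ js, 0 ≤ j ∧ j < N) → (0 ≤ i ∧ i < N) →
      Shape N stA.2 → absA N stA.2 = absB grid N stB.2 → stA.1 = stB.1 →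
      (js.foldl (fun st j => if getCell st.2 i j = 0 then (st.1 + 1, dfsA FA st.2 i j) else st) stA).1
        = (js.foldl (fun st j => if blockedB grid i j = false ∧ PySem.Set.contains st.2 (i, j) = false
            then (st.1 + 1, fillB grid N FB st.2 [(i, j)]) else st) stB).1
      ∧ Shape N (js.foldl (fun st j => if getCell st.2 i j = 0 then (st.1 + 1, dfsA FA st.2 i j) else st) stA).2
      ∧ absA N (js.foldl (fun st j => if getCell st.2 i j = 0 then (st.1 + 1, dfsA FA st.2 i j) else st) stA).2
        = absB grid N (js.foldl (fun st j => if blockedB grid i j = false ∧ PySem.Set.contains st.2 (i, j) = false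
            then (st.1 + 1, fillB grid N FB st.2 [(i, j)]) else st) stB).2 := by
  intro js
  induction js with
  | nil => intro i stA stB _ _ hsh habs hcnt; exact ⟨hcnt, hsh, habs⟩
  | cons j js ih =>
    intro i stA stB hjs hi hsh habs hcnt
    have hj := hjs j (List.mem_cons_self)
    have hjs' : ∀ x ∈ js, 0 ≤ x ∧ x < N := fun x hx => hjs x (List.mem_cons_of_mem _ hx)
    have hinb : inb N (i, j) = true := by simp [inb]; omega
    simp only [List.foldl_cons]
    have hcond : (getCell stA.2 i j = 0) ↔
        (blockedB grid i j = false ∧ PySem.Set.contains stB.2 (i, j) = false) := by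
      have hA : absA N stA.2 (i, j) = (getCell stA.2 i j == 0) := by
        simp [absA, hinb]
      have hB : absB grid N stB.2 (i, j)
          = (!blockedB grid i j && !PySem.Set.contains stB.2 (i, j)) := by
        simp [absB, hinb]
      constructor
      · intro h
        have : absA N stA.2 (i, j) = true := by simp [hA, h]
        rw [habs, hB] at this
        simp at this
        exact ⟨by simp [this.1], by simp [this.2]⟩
      · intro h
        have : absB grid N stB.2 (i, j) = true := by
          rw [hB, h.1, h.2]; rfl
        rw [← habs, hA] at this
        simpa using this
    by_cases hc : getCell stA.2 i j = 0
    · rw [if_pos hc, if_pos (hcond.mp hc)]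
      have hzb : 5 * Zc N (absA N stA.2) + 1 ≤ FA := by
        have := Zc_le N (absA N stA.2); omega
      obtain ⟨eA, hshA⟩ := dfsA_proc (N := N) FA stA.2 i j hsh hzb
      have eB := fillB_proc grid N FB stB.2 [(i, j)]
      apply ih i (stA.1 + 1, dfsA FA stA.2 i j) (stB.1 + 1, fillB grid N FB stB.2 [(i, j)])
        hjs' hi hshA _ (by simp [hcnt])
      show absA N (dfsA FA stA.2 i j) = absB grid N (fillB grid N FB stB.2 [(i, j)])
      rw [eA, eB, habs]
      simp only [List.reverse_cons, List.reverse_nil, List.nil_append]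
      apply proc_stab (N := N)
      · rw [← habs]; exact Bnd_absA N stA.2
      · have := Zc_le N (absB grid N stB.2); simp; omega
      · have := Zc_le N (absB grid N stB.2); simp; omega
    · rw [if_neg hc, if_neg (fun h => hc (hcond.mpr h))]
      exact ih i stA stB hjs' hi hsh habs hcnt

lemma count_outer (grid : List String) (N : Int) (FA FB : Nat)
    (hFA : 5 * (N.toNat * N.toNat) + 1 ≤ FA) (hFB : 5 * (N.toNat * N.toNat) + 1 ≤ FB)
    (js : List Int) (hjs : ∀ j ∈ js, 0 ≤ j ∧ j < N) :
    ∀ (is : List Int) (stA : Int × List (List Int)) (stB : Int × PySem.Set (Int × Int)),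
      (∀ i ∈ is, 0 ≤ i ∧ i < N) →
      Shape N stA.2 → absA N stA.2 = absB grid N stB.2 → stA.1 = stB.1 →
      (is.foldl (fun st i => js.foldl (fun st j =>
          if getCell st.2 i j = 0 then (st.1 + 1, dfsA FA st.2 i j) else st) st) stA).1
        = (is.foldl (fun st i => js.foldl (fun st j =>
          if blockedB grid i j = false ∧ PySem.Set.contains st.2 (i, j) = false
            then (st.1 + 1, fillB grid N FB st.2 [(i, j)]) else st) st) stB).1 := by
  intro is
  induction is with
  | nil => intro stA stB _ _ _ hcnt; exact hcnt
  | cons i is ih =>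
    intro stA stB his hsh habs hcnt
    have hi := his i (List.mem_cons_self)
    have his' : ∀ x ∈ is, 0 ≤ x ∧ x < N := fun x hx => his x (List.mem_cons_of_mem _ hx)
    simp only [List.foldl_cons]
    obtain ⟨h1, h2, h3⟩ := count_inner grid N FA FB hFA hFB js i stA stB hjs hi hsh habs hcnt
    exact ih _ _ his' h2 h3 h1

-- ===== builder folds =====
lemma build_inner {n N : Int} (grid : List String) (hN : N = 3 * n)
    (hn : (grid.length : Int) = n) (hpre : Pre_regionNum grid) (i : Int) (hi : 0 ≤ i ∧ i < n) :
    ∀ (js : List Int) (g : List (List Int)) (m : Int × Int → Bool),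
      Shape N g → (∀ j ∈ js, 0 ≤ j ∧ j < n) →
      (∀ r c, inb N (r, c) = true → getCell g r c = if m (r, c) = true then 1 else 0) →
      Shape N (js.foldl (fun g j => buildBody grid g i j) g) ∧
      ∀ r c, inb N (r, c) = true →
        getCell (js.foldl (fun g j => buildBody grid g i j) g) r c =
          if (m (r, c) || (decide (PySem.Int.floordiv r 3 = i) &&
              js.contains (PySem.Int.floordiv c 3) && blockedB grid r c)) = true
          then 1 else 0 := by
  intro js
  induction js with
  | nil =>
    intro g m hsh _ hinv
    refine ⟨hsh, fun r c hrc => ?_⟩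
    simp [hinv r c hrc]
  | cons j js ih =>
    intro g m hsh hjs hinv
    have hj := hjs j (List.mem_cons_self)
    have hjs' : ∀ x ∈ js, 0 ≤ x ∧ x < n := fun x hx => hjs x (List.mem_cons_of_mem _ hx)
    simp only [List.foldl_cons]
    obtain ⟨hsh', hstep⟩ := build_step grid hN hn hpre hsh hi hj
    have hinv' : ∀ r c, inb N (r, c) = true →
        getCell (buildBody grid g i j) r c =
          if (m (r, c) || (decide (PySem.Int.floordiv r 3 = i) &&
              decide (PySem.Int.floordiv c 3 = j) && blockedB grid r c)) = true
          then 1 else 0 := by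
      intro r c hrc
      rw [hstep r c hrc, hinv r c hrc]
      by_cases h1 : m (r, c) = true <;>
        by_cases h2 : (decide (PySem.Int.floordiv r 3 = i) &&
          decide (PySem.Int.floordiv c 3 = j) && blockedB grid r c) = true <;>
        simp [h1, h2]
    obtain ⟨hshF, hF⟩ := ih (buildBody grid g i j)
      (fun p => m p || (decide (PySem.Int.floordiv p.1 3 = i) &&
        decide (PySem.Int.floordiv p.2 3 = j) && blockedB grid p.1 p.2)) hsh' hjs' hinv'
    refine ⟨hshF, fun r c hrc => ?_⟩
    rw [hF r c hrc]
    congr 1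
    by_cases h1 : m (r, c) = true <;>
      by_cases h2 : PySem.Int.floordiv r 3 = i <;>
      by_cases h3 : PySem.Int.floordiv c 3 = j <;>
      by_cases h4 : js.contains (PySem.Int.floordiv c 3) = true <;>
      by_cases h5 : blockedB grid r c = true <;>
      simp [h1, h2, h3, h4, h5, List.contains_cons]
    all_goals simp_all

lemma build_outer {n N : Int} (grid : List String) (hN : N = 3 * n)
    (hn : (grid.length : Int) = n) (hpre : Pre_regionNum grid) (js : List Int)
    (hjsb : ∀ j ∈ js, 0 ≤ j ∧ j < n) :
    ∀ (is : List Int) (g : List (List Int)) (m : Int × Int → Bool),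
      Shape N g → (∀ i ∈ is, 0 ≤ i ∧ i < n) →
      (∀ r c, inb N (r, c) = true → getCell g r c = if m (r, c) = true then 1 else 0) →
      Shape N (is.foldl (fun g i => js.foldl (fun g j => buildBody grid g i j) g) g) ∧
      ∀ r c, inb N (r, c) = true →
        getCell (is.foldl (fun g i => js.foldl (fun g j => buildBody grid g i j) g) g) r c =
          if (m (r, c) || (is.contains (PySem.Int.floordiv r 3) &&
              js.contains (PySem.Int.floordiv c 3) && blockedB grid r c)) = true
          then 1 else 0 := by
  intro is
  induction is with
  | nil =>
    intro g m hsh _ hinv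
    refine ⟨hsh, fun r c hrc => ?_⟩
    simp [hinv r c hrc]
  | cons i is ih =>
    intro g m hsh his hinv
    have hi := his i (List.mem_cons_self)
    have his' : ∀ x ∈ is, 0 ≤ x ∧ x < n := fun x hx => his x (List.mem_cons_of_mem _ hx)
    simp only [List.foldl_cons]
    obtain ⟨hsh', hstep⟩ := build_inner grid hN hn hpre i hi js g m hsh hjsb hinv
    obtain ⟨hshF, hF⟩ := ih _
      (fun p => m p || (decide (PySem.Int.floordiv p.1 3 = i) &&
        js.contains (PySem.Int.floordiv p.2 3) && blockedB grid p.1 p.2)) hsh' his' hstep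
    refine ⟨hshF, fun r c hrc => ?_⟩
    rw [hF r c hrc]
    congr 1
    by_cases h1 : m (r, c) = true <;>
      by_cases h2 : PySem.Int.floordiv r 3 = i <;>
      by_cases h3 : is.contains (PySem.Int.floordiv r 3) = true <;>
      by_cases h4 : js.contains (PySem.Int.floordiv c 3) = true <;>
      by_cases h5 : blockedB grid r c = true <;>
      simp [h1, h2, h3, h4, h5, List.contains_cons]
    all_goals simp_all
lemma g0_ok (N : Int) (hN : 0 ≤ N) :
    Shape N ((PySem.List.pyRange 0 N 1).map (fun _ => List.replicate N.toNat (0:Int))) ∧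
    ∀ r c, inb N (r, c) = true →
      getCell ((PySem.List.pyRange 0 N 1).map (fun _ => List.replicate N.toNat (0:Int))) r c = 0 := by
  have hsh : Shape N ((PySem.List.pyRange 0 N 1).map (fun _ => List.replicate N.toNat (0:Int))) := by
    constructor
    · simp [PySem.List.length_pyRange_one]
      omega
    · intro row hrow
      obtain ⟨x, _, hx⟩ := List.mem_map.mp hrow
      rw [← hx]
      simp
      omega
  refine ⟨hsh, fun r c hrc => ?_⟩
  obtain ⟨row, hrow, hlen, hget⟩ := getCell_eq hsh hrc
  have hmem : row ∈ (PySem.List.pyRange 0 N 1).map (fun _ => List.replicate N.toNat (0:Int)) := by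
    exact List.mem_of_getElem? hrow
  obtain ⟨x, _, hx⟩ := List.mem_map.mp hmem
  rw [hget, ← hx]
  simp [inb] at hrc
  rw [List.getElem?_replicate, if_pos (by omega)]
  rfl

theorem main_eq (grid : List String) (hpre : Pre_regionNum grid) :
    regionNum grid = regionNum_alt grid := by
  have h3 : (3 * (grid.length : Int)) = (grid.length : Int) * 3 := by ring
  simp only [regionNum, regionNum_alt, h3]
  set n : Int := (grid.length : Int) with hn
  set N : Int := n * 3 with hNdef
  have hN0 : 0 ≤ N := by omega
  have hN3 : N = 3 * n := by omega
  -- builder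
  obtain ⟨hsh0, hget0⟩ := g0_ok N hN0
  have hnb : ∀ j ∈ PySem.List.pyRange 0 n 1, 0 ≤ j ∧ j < n := by
    intro j hj
    rw [PySem.List.mem_pyRange_one] at hj
    exact hj
  obtain ⟨hsh1, hget1⟩ := build_outer grid hN3 rfl hpre (PySem.List.pyRange 0 n 1) hnb
    (PySem.List.pyRange 0 n 1)
    ((PySem.List.pyRange 0 N 1).map (fun _ => List.replicate N.toNat (0:Int)))
    (fun _ => false) hsh0 hnb (fun r c hrc => by rw [hget0 r c hrc]; simp)
  -- initial abstract states agree
  have habs : absA N ((PySem.List.pyRange 0 n 1).foldl (fun g i =>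
        (PySem.List.pyRange 0 n 1).foldl (fun g j => buildBody grid g i j) g)
        ((PySem.List.pyRange 0 N 1).map (fun _ => List.replicate N.toNat (0:Int))))
      = absB grid N PySem.Set.empty := by
    funext c
    obtain ⟨r, c'⟩ := c
    by_cases hrc : inb N (r, c') = true
    · have hcr : (PySem.List.pyRange 0 n 1).contains (PySem.Int.floordiv r 3) = true := by
        simp [PySem.List.mem_pyRange_one, fd3]
        simp [inb] at hrc
        omega
      have hcc : (PySem.List.pyRange 0 n 1).contains (PySem.Int.floordiv c' 3) = true := by
        simp [PySem.List.mem_pyRange_one, fd3]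
        simp [inb] at hrc
        omega
      have hg1 := hget1 r c' hrc
      rw [hcr, hcc] at hg1
      simp only [Bool.false_or, Bool.true_and] at hg1
      simp only [absA, absB, hrc, Bool.true_and]
      have hce : PySem.Set.contains (PySem.Set.empty : PySem.Set (Int × Int)) (r, c') = false := rfl
      rw [hce]
      cases hb : blockedB grid r c' with
      | true => rw [hb] at hg1; simp at hg1; simp [hg1]
      | false => rw [hb] at hg1; simp at hg1; simp [hg1]
    · have h' : inb N (r, c') = false := by simpa using hrc
      simp [absA, absB, h']
  -- fuel bound
  have hfuel : 5 * (N.toNat * N.toNat) + 1 ≤ (5 * N * N + 1).toNat := by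
    have hc : ((N.toNat : Int)) = N := Int.toNat_of_nonneg hN0
    have : (5 * N * N + 1 : Int) = ((5 * (N.toNat * N.toNat) + 1 : Nat) : Int) := by
      push_cast [hc]; ring
    rw [this, Int.toNat_natCast]
  have hNb : ∀ j ∈ PySem.List.pyRange 0 N 1, 0 ≤ j ∧ j < N := by
    intro j hj
    rw [PySem.List.mem_pyRange_one] at hj
    exact hj
  exact count_outer grid N ((5 * N * N + 1).toNat) ((5 * N * N + 1).toNat) hfuel hfuel
    (PySem.List.pyRange 0 N 1) hNb (PySem.List.pyRange 0 N 1) _ _ hNb hsh1 habs rfl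

-- ===== VERDICT (by name: the statement is the Claim_ definition above) =====
theorem regionNum_spec : Claim_equal_regionNum := by
  intro grid _ hpre
  unfold Spec_regionNum
  exact main_eq grid hpre
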